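-- pv_equiv track=rewrite | github.com/barShterenberg/Fundamentals-and-Applications-of-AI-Project | part_1/ex1_209149756_209249820.py | bfs_between_every_two_slots
-- ===== SOURCE A (Python) =====
-- def bfs_between_every_two_slots (grid):
--     grid_height, grid_width = len(grid), len(grid[0])
--     distance_grid = [
--         [
--             [
--                 [-1 for _ in range(grid_width)]
--                 for _ in range(grid_height)
--             ]
--             for _ in range(grid_width)
--         ]
--         for _ in range(grid_height)
--     ]
--
--     for origin_row in range(grid_height):
--         for origin_col in range(grid_width):
--             if grid[origin_row][origin_col] in ['S', 'B']:
--                 exploration_queue = [(origin_row, origin_col, 0)]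
--
--                 has_visited = [[False] * grid_width for _ in range(grid_height)]
--                 has_visited[origin_row][origin_col] = True
--
--                 while exploration_queue:
--                     current_row, current_col, current_distance = exploration_queue.pop(0)
--                     distance_grid[origin_row][origin_col][current_row][current_col] = current_distance
--
--                     for delta_row, delta_col in [(0, 1), (1, 0), (0, -1), (-1, 0)]:
--                         next_row, next_col = current_row + delta_row, current_col + delta_col
--                         if 0 <= next_row < grid_height and 0 <= next_col < grid_width and grid[next_row][
--                             next_col] in ['S', 'B'] and not has_visited[next_row][next_col]:
--                             has_visited[next_row][next_col] = True
--                             exploration_queue.append((next_row, next_col, current_distance + 1))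
--
--     return distance_grid
-- ===== SOURCE B (Python) =====
-- def bfs_between_every_two_slots(grid):
--     # Bellman-Ford style dynamic programming: instead of a BFS queue per origin,
--     # repeatedly rebuild the whole distance grid, each cell taking
--     # min(itself, 1 + orthogonal neighbours), until the grid stops changing.
--     H, W = len(grid), len(grid[0])
--     INF = H * W + 1
--
--     def passable(r, c):
--         return 0 <= r < H and 0 <= c < W and grid[r][c] in ('S', 'B')
--
--     out = []
--     for sr in range(H):
--         out_row = []
--         for sc in range(W):
--             if not passable(sr, sc):
--                 out_row.append([[-1] * W for _ in range(H)])
--                 continue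
--             dist = [[INF] * W for _ in range(H)]
--             dist[sr][sc] = 0
--             for _ in range(H * W):
--                 new = [
--                     [
--                         min([dist[i][j]]
--                             + [dist[i2][j2] + 1
--                                for (i2, j2) in ((i, j + 1), (i + 1, j), (i, j - 1), (i - 1, j))
--                                if 0 <= i2 < H and 0 <= j2 < W])
--                         if passable(i, j) else INF
--                         for j in range(W)
--                     ]
--                     for i in range(H)
--                 ]
--                 if new == dist:
--                     break
--                 dist = new
--             out_row.append([[x if x < INF else -1 for x in row] for row in dist])
--         out.append(out_row)
--     return out
-- ===== Notes on version B (the rewrite author's own statement) =====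
-- stated objective: alternative
-- what changed: Per-origin FIFO-queue BFS with a visited matrix mutating a preallocated 4D grid is replaced by Bellman-Ford style dynamic programming: per origin the whole distance grid is repeatedly rebuilt with dist[v] = min(dist[v], 1 + neighbours) until it reaches a fixpoint, then the INF sentinel is replaced by -1.
import Mathlib
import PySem

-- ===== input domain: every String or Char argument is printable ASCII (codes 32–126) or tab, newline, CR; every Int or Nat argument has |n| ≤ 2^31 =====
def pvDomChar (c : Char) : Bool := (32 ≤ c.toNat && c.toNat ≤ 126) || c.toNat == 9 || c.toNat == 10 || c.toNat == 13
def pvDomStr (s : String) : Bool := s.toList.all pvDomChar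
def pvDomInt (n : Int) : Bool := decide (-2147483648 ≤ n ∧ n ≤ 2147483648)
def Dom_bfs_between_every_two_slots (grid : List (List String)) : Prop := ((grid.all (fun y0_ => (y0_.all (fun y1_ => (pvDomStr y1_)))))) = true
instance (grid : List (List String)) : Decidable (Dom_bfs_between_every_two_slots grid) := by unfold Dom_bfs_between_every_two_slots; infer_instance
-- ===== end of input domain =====

-- B replaces A's per-origin FIFO-queue BFS (visited matrix, mutated 4D grid) by
-- Bellman-Ford style dynamic programming: per origin the whole distance grid is
-- repeatedly rebuilt with min(cell, 1 + neighbours) until it stops changing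
-- (objective: alternative, similar cost).

-- ===== PORT A =====
def pvIsSB (s : String) : Bool := s == "S" || s == "B"

def pvCell (grid : List (List String)) (r c : Int) : String :=
  (grid.getD r.toNat []).getD c.toNat ""

def pvGet2 (v : List (List Bool)) (r c : Int) : Bool :=
  (v.getD r.toNat []).getD c.toNat false

def pvSet2 (v : List (List Bool)) (r c : Int) (b : Bool) : List (List Bool) :=
  v.set r.toNat ((v.getD r.toNat []).set c.toNat b)

def pvSetI2 (g : List (List Int)) (r c : Int) (x : Int) : List (List Int) :=
  g.set r.toNat ((g.getD r.toNat []).set c.toNat x)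

-- the neighbour test of A: bounds, passable cell, not yet visited
def pvCondA (grid : List (List String)) (H W : Nat) (vis : List (List Bool)) (nr nc : Int) : Bool :=
  decide (0 ≤ nr) && decide (nr < (H : Int)) && decide (0 ≤ nc) && decide (nc < (W : Int)) &&
    pvIsSB (pvCell grid nr nc) && !pvGet2 vis nr nc

-- A's while-loop over the FIFO queue of (row, col, distance) triples (fuel makes it total;
-- the chosen fuel H*W+1 is never exhausted: each pop consumes a cell marked visited at enqueue)
def pvLoopA (grid : List (List String)) (H W : Nat) :
    Nat → List (Int × Int × Int) → List (List Bool) → List (List Int) → List (List Int)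
  | 0, _, _, g => g
  | fuel + 1, q, vis, g =>
    match q with
    | [] => g
    | (r, c, dist) :: rest =>
      let g' := pvSetI2 g r c dist
      let st := [((0 : Int), (1 : Int)), (1, 0), (0, -1), (-1, 0)].foldl
        (fun (st : List (List Bool) × List (Int × Int × Int)) δ =>
          let nr := r + δ.1
          let nc := c + δ.2
          if pvCondA grid H W st.1 nr nc then (pvSet2 st.1 nr nc true, st.2 ++ [(nr, nc, dist + 1)])
          else st)
        (vis, rest)
      pvLoopA grid H W fuel st.2 st.1 g'

def bfs_between_every_two_slots (grid : List (List String)) : List (List (List (List Int))) :=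
  let H := grid.length
  let W := (grid.getD 0 []).length
  (List.range H).map fun (origin_row : Nat) =>
    (List.range W).map fun (origin_col : Nat) =>
      if pvIsSB (pvCell grid (origin_row : Int) (origin_col : Int)) then
        pvLoopA grid H W (H * W + 1) [((origin_row : Int), (origin_col : Int), 0)]
          (pvSet2 ((List.range H).map fun _ => (List.range W).map fun _ => false)
            (origin_row : Int) (origin_col : Int) true)
          ((List.range H).map fun _ => (List.range W).map fun _ => (-1 : Int))
      else (List.range H).map fun _ => (List.range W).map fun _ => (-1 : Int)

-- ===== PORT B =====
-- B's `passable(r, c)`: bounds plus an 'S'/'B' cell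
def pvPassB (grid : List (List String)) (H W : Nat) (r c : Int) : Bool :=
  decide (0 ≤ r) && decide (r < (H : Int)) && decide (0 ≤ c) && decide (c < (W : Int)) &&
    pvIsSB (pvCell grid r c)

-- the four orthogonal neighbour coordinates, in B's order
def pvCands (p : Int × Int) : List (Int × Int) :=
  [(p.1, p.2 + 1), (p.1 + 1, p.2), (p.1, p.2 - 1), (p.1 - 1, p.2)]

def pvGetI2 (g : List (List Int)) (r c : Int) : Int :=
  (g.getD r.toNat []).getD c.toNat 0

-- one relaxation round: every passable cell takes min(itself, 1 + in-bounds neighbours)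
def pvRelax (grid : List (List String)) (H W : Nat) (INF : Int) (g : List (List Int)) :
    List (List Int) :=
  (List.range H).map fun (i : Nat) => (List.range W).map fun (j : Nat) =>
    if pvPassB grid H W (i : Int) (j : Int) then
      (((pvCands ((i : Int), (j : Int))).filter fun p =>
          decide (0 ≤ p.1) && decide (p.1 < (H : Int)) && decide (0 ≤ p.2) &&
            decide (p.2 < (W : Int))).map
        fun p => pvGetI2 g p.1 p.2 + 1).foldl min (pvGetI2 g (i : Int) (j : Int))
    else INF

-- B's `for _ in range(H*W): new = relax(dist); if new == dist: break; dist = new`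
def pvBellLoop (grid : List (List String)) (H W : Nat) (INF : Int) :
    Nat → List (List Int) → List (List Int)
  | 0, g => g
  | f + 1, g =>
    let g' := pvRelax grid H W INF g
    if g' = g then g else pvBellLoop grid H W INF f g'

def bfs_between_every_two_slots_alt (grid : List (List String)) : List (List (List (List Int))) :=
  let H := grid.length
  let W := (grid.getD 0 []).length
  let INF : Int := ((H * W : Nat) : Int) + 1
  (List.range H).map fun (sr : Nat) =>
    (List.range W).map fun (sc : Nat) =>
      if pvPassB grid H W (sr : Int) (sc : Int) then
        (pvBellLoop grid H W INF (H * W)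
            (pvSetI2 ((List.range H).map fun _ => (List.range W).map fun _ => INF)
              (sr : Int) (sc : Int) 0)).map
          fun row => row.map fun x => if x < INF then x else -1
      else (List.range H).map fun _ => List.replicate W (-1)

-- ===== PRECONDITION & SPEC =====
-- Pre_ excludes exactly the inputs on which Python A raises IndexError: the empty grid
-- (grid[0]) and grids with a row shorter than row 0 (row indexing during the scan).
def Pre_bfs_between_every_two_slots (grid : List (List String)) : Prop :=
  grid ≠ [] ∧ ∀ row ∈ grid, (grid.getD 0 []).length ≤ row.length
instance (grid : List (List String)) : Decidable (Pre_bfs_between_every_two_slots grid) := by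
  unfold Pre_bfs_between_every_two_slots; infer_instance

def pvWitness_bfs_between_every_two_slots : List (List String) := [["S", "."], ["B", "S"]]

def Spec_bfs_between_every_two_slots (grid : List (List String)) (out : List (List (List (List Int)))) : Prop := out = bfs_between_every_two_slots_alt grid
instance (grid : List (List String)) (out : List (List (List (List Int)))) : Decidable (Spec_bfs_between_every_two_slots grid out) := by unfold Spec_bfs_between_every_two_slots; infer_instance

-- ===== CLAIM (what is proved, stated in full; the proofs are below) =====
def Claim_equal_bfs_between_every_two_slots : Prop := ∀ (grid : List (List String)), Dom_bfs_between_every_two_slots grid → Pre_bfs_between_every_two_slots grid → Spec_bfs_between_every_two_slots grid (bfs_between_every_two_slots grid)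

-- ===== LEMMAS AND PROOFS =====

def pvInB (H W : Nat) (p : Int × Int) : Prop :=
  0 ≤ p.1 ∧ p.1 < (H : Int) ∧ 0 ≤ p.2 ∧ p.2 < (W : Int)

def pvShape {α : Type} (v : List (List α)) (H W : Nat) : Prop :=
  v.length = H ∧ ∀ row ∈ v, row.length = W

def pvIdx {α : Type} (v : List (List α)) (r c : Int) (d0 : α) : α :=
  (v.getD r.toNat []).getD c.toNat d0

def pvUpd {α : Type} (v : List (List α)) (r c : Int) (x : α) : List (List α) :=
  v.set r.toNat ((v.getD r.toNat []).set c.toNat x)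

lemma pvShape_upd {α : Type} {v : List (List α)} {H W : Nat} {r c : Int} {x : α}
    (h : pvShape v H W) (hp : pvInB H W (r, c)) : pvShape (pvUpd v r c x) H W := by
  obtain ⟨h1, h2⟩ := h
  obtain ⟨a, b, cc, dd⟩ := hp
  refine ⟨by simpa [pvUpd] using h1, ?_⟩
  intro row hrow
  rcases List.mem_or_eq_of_mem_set hrow with h | h
  · exact h2 row h
  · subst h
    have hr : r.toNat < v.length := by omega
    rw [List.getD_eq_getElem v [] hr, List.length_set]
    exact h2 _ (List.getElem_mem hr)

lemma pvIdx_upd {α : Type} {v : List (List α)} {H W : Nat} {r c r' c' : Int} {x : α} {d0 : α}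
    (h : pvShape v H W) (hp : pvInB H W (r, c)) (hp' : pvInB H W (r', c')) :
    pvIdx (pvUpd v r c x) r' c' d0 = if r' = r ∧ c' = c then x else pvIdx v r' c' d0 := by
  obtain ⟨h1, h2⟩ := h
  obtain ⟨a1, a2, a3, a4⟩ := hp
  obtain ⟨b1, b2, b3, b4⟩ := hp'
  have hr : r.toNat < v.length := by omega
  have hr' : r'.toNat < v.length := by omega
  have hcw : c.toNat < (v[r.toNat]).length := by
    rw [h2 _ (List.getElem_mem hr)]; omega
  by_cases hrr : r' = r
  · subst hrr
    have hcw' : c'.toNat < (v[r'.toNat]).length := by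
      rw [h2 _ (List.getElem_mem hr')]; omega
    unfold pvIdx pvUpd
    rw [List.getD_eq_getElem _ [] (by simpa using hr'), List.getElem_set_self,
        List.getD_eq_getElem v [] hr']
    by_cases hcc : c' = c
    · subst hcc
      rw [List.getD_eq_getElem _ _ (by simpa using hcw'), List.getElem_set_self,
          List.getD_eq_getElem _ _ hcw']
      simp
    · have : c'.toNat ≠ c.toNat := by omega
      rw [List.getD_eq_getElem _ _ (by simpa using hcw'), List.getElem_set_ne (by omega),
          List.getD_eq_getElem _ _ hcw']
      simp [hcc]
  · have : r'.toNat ≠ r.toNat := by omega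
    unfold pvIdx pvUpd
    rw [List.getD_eq_getElem _ [] (by simpa using hr'), List.getElem_set_ne (by omega),
        List.getD_eq_getElem v [] hr']
    simp [hrr]

lemma pvShape_tab {α : Type} (H W : Nat) (F : Nat → Nat → α) :
    pvShape ((List.range H).map fun i => (List.range W).map fun j => F i j) H W := by
  constructor
  · simp
  · intro row hrow
    simp only [List.mem_map] at hrow
    obtain ⟨i, _, rfl⟩ := hrow
    simp

lemma pvIdx_tab {α : Type} {H W : Nat} (F : Nat → Nat → α) {r c : Int} {d0 : α}
    (hp : pvInB H W (r, c)) :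
    pvIdx ((List.range H).map fun i => (List.range W).map fun j => F i j) r c d0
      = F r.toNat c.toNat := by
  obtain ⟨a1, a2, a3, a4⟩ := hp
  have hr : r.toNat < H := by omega
  have hc : c.toNat < W := by omega
  unfold pvIdx
  rw [List.getD_eq_getElem _ [] (by simpa using hr)]
  simp [hc]

lemma pvTab_ext {α : Type} {g : List (List α)} {H W : Nat} (d0 : α) (F : Nat → Nat → α)
    (hs : pvShape g H W)
    (h : ∀ (i j : Nat), i < H → j < W → pvIdx g (i : Int) (j : Int) d0 = F i j) :
    g = (List.range H).map fun i => (List.range W).map fun j => F i j := by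
  obtain ⟨h1, h2⟩ := hs
  apply List.ext_getElem
  · simp [h1]
  · intro i hi hi'
    have hiH : i < H := by simpa [h1] using hi
    apply List.ext_getElem
    · simp [h2 _ (List.getElem_mem hi)]
    · intro j hj hj'
      have hjW : j < W := by
        have := h2 _ (List.getElem_mem hi); omega
      have := h i j hiH hjW
      unfold pvIdx at this
      rw [List.getD_eq_getElem g [] (by simpa [h1] using hiH)] at this
      rw [List.getD_eq_getElem _ d0 (by simpa using hj)] at this
      simpa [hiH, hjW] using this

-- proof-side model of the BFS: the passable-cell set and a level-synchronous frontier loop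
def pvPassable (grid : List (List String)) (H W : Nat) : PySem.Set (Int × Int) :=
  PySem.Set.ofList ((List.range H).flatMap fun (r : Nat) =>
    ((List.range W).filter fun (c : Nat) => pvIsSB (pvCell grid (r : Int) (c : Int))).map
      fun (c : Nat) => ((r : Int), (c : Int)))

def pvStepB (passable : PySem.Set (Int × Int)) (d : Int)
    (st : PySem.Dict (Int × Int) Int × List (Int × Int)) (cand : Int × Int) :
    PySem.Dict (Int × Int) Int × List (Int × Int) :=
  if PySem.Set.contains passable cand && !(st.1.contains cand) then
    (st.1.insert cand d, st.2 ++ [cand])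
  else st

def pvNodeB (passable : PySem.Set (Int × Int)) (d : Int)
    (st : PySem.Dict (Int × Int) Int × List (Int × Int)) (p : Int × Int) :
    PySem.Dict (Int × Int) Int × List (Int × Int) :=
  (pvCands p).foldl (pvStepB passable d) st

def pvLoopB (passable : PySem.Set (Int × Int)) :
    Nat → List (Int × Int) → PySem.Dict (Int × Int) Int → Int → PySem.Dict (Int × Int) Int
  | 0, _, dist, _ => dist
  | fuel + 1, frontier, dist, d =>
    if frontier.isEmpty then dist
    else
      let res := frontier.foldl (pvNodeB passable (d + 1)) (dist, [])
      pvLoopB passable fuel res.2 res.1 (d + 1)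

lemma pvMem_passable (grid : List (List String)) (H W : Nat) (p : Int × Int) :
    PySem.Set.contains (pvPassable grid H W) p = true ↔
      pvInB H W p ∧ pvIsSB (pvCell grid p.1 p.2) = true := by
  unfold pvPassable
  simp only [PySem.Set.contains, List.contains_eq_mem, PySem.Set.mem_ofList, decide_eq_true_eq,
    List.mem_flatMap, List.mem_map, List.mem_filter, List.mem_range]
  constructor
  · rintro ⟨r, hr, c, ⟨hc, hSB⟩, rfl⟩
    refine ⟨⟨by simp, by simpa using hr, by simp, by simpa using hc⟩, by simpa using hSB⟩
  · rintro ⟨⟨a1, a2, a3, a4⟩, hSB⟩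
    refine ⟨p.1.toNat, by omega, p.2.toNat, ⟨by omega, ?_⟩, ?_⟩
    · simpa [Int.toNat_of_nonneg a1, Int.toNat_of_nonneg a3] using hSB
    · simp [Int.toNat_of_nonneg a1, Int.toNat_of_nonneg a3]

lemma pvCondA_eq (grid : List (List String)) (H W : Nat) (vis : List (List Bool))
    (dist : PySem.Dict (Int × Int) Int) (nr nc : Int)
    (hR : ∀ p : Int × Int, pvInB H W p → pvGet2 vis p.1 p.2 = dist.contains p) :
    pvCondA grid H W vis nr nc
      = (PySem.Set.contains (pvPassable grid H W) (nr, nc) && !(dist.contains (nr, nc))) := by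
  by_cases h : pvInB H W (nr, nc)
  · have hg := hR (nr, nc) h
    obtain ⟨a1, a2, a3, a4⟩ := h
    simp only at a1 a2 a3 a4 hg
    by_cases hSB : pvIsSB (pvCell grid nr nc) = true
    · have hP : PySem.Set.contains (pvPassable grid H W) (nr, nc) = true := by
        rw [pvMem_passable]; exact ⟨⟨a1, a2, a3, a4⟩, hSB⟩
      have hmem : (nr, nc) ∈ pvPassable grid H W := by
        simpa [PySem.Set.contains, List.contains_eq_mem] using hP
      simp [pvCondA, a1, a2, a3, a4, hSB, hg, hmem]
    · have hP : PySem.Set.contains (pvPassable grid H W) (nr, nc) = false := by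
        rw [← Bool.not_eq_true, pvMem_passable]; tauto
      have hnm : (nr, nc) ∉ pvPassable grid H W := by
        intro hm
        simp [PySem.Set.contains, List.contains_eq_mem, hm] at hP
      simp [pvCondA, hSB, hnm]
  · have hP : PySem.Set.contains (pvPassable grid H W) (nr, nc) = false := by
      rw [← Bool.not_eq_true, pvMem_passable]; tauto
    have h' : ¬ (0 ≤ nr ∧ nr < (H:Int) ∧ 0 ≤ nc ∧ nc < (W:Int)) := h
    simp only [pvCondA, hP, Bool.false_and]
    rw [Bool.eq_false_iff]
    intro hcon
    simp only [Bool.and_eq_true, decide_eq_true_eq] at hcon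
    exact h' ⟨hcon.1.1.1.1.1, hcon.1.1.1.1.2, hcon.1.1.1.2, hcon.1.1.2⟩

lemma pvCNT {H W : Nat} {l : List (Int × Int)} (h1 : l.Nodup) (h2 : ∀ k ∈ l, pvInB H W k) :
    l.length ≤ H * W := by
  classical
  rcases l with _ | ⟨p, l'⟩
  · simp
  · have hW : 0 < W := by
      have := h2 p (by simp); obtain ⟨_, _, a3, a4⟩ := this; omega
    set L := p :: l' with hL
    have hcard : L.length = L.toFinset.card := (List.toFinset_card_of_nodup h1).symm
    rw [hcard]
    have : L.toFinset.card = (L.toFinset.image (fun k : Int × Int => k.1.toNat * W + k.2.toNat)).card := by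
      rw [Finset.card_image_of_injOn]
      intro a ha b hb hab
      have hA := h2 a (by simpa using ha)
      have hB := h2 b (by simpa using hb)
      obtain ⟨x1, x2, x3, x4⟩ := hA
      obtain ⟨y1, y2, y3, y4⟩ := hB
      simp only at hab
      have hfst : a.1.toNat = b.1.toNat := by
        by_contra hne
        rcases Nat.lt_or_ge a.1.toNat b.1.toNat with hlt | hge
        · have : a.1.toNat * W + a.2.toNat < b.1.toNat * W := by
            calc a.1.toNat * W + a.2.toNat < (a.1.toNat + 1) * W := by rw [Nat.succ_mul]; omega
              _ ≤ b.1.toNat * W := Nat.mul_le_mul_right W hlt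
          omega
        · have hlt : b.1.toNat < a.1.toNat := by omega
          have : b.1.toNat * W + b.2.toNat < a.1.toNat * W := by
            calc b.1.toNat * W + b.2.toNat < (b.1.toNat + 1) * W := by rw [Nat.succ_mul]; omega
              _ ≤ a.1.toNat * W := Nat.mul_le_mul_right W hlt
          omega
      rw [hfst] at hab
      have : a.1 = b.1 ∧ a.2 = b.2 := by omega
      exact Prod.ext this.1 this.2
    rw [this]
    have hsub : (L.toFinset.image (fun k : Int × Int => k.1.toNat * W + k.2.toNat)) ⊆ Finset.range (H * W) := by
      intro n hn
      simp only [Finset.mem_image] at hn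
      obtain ⟨k, hk, rfl⟩ := hn
      have := h2 k (by simpa using hk)
      obtain ⟨x1, x2, x3, x4⟩ := this
      have hk1 : k.1.toNat < H := by omega
      have hk2 : k.2.toNat < W := by omega
      have : k.1.toNat * W + k.2.toNat < (k.1.toNat + 1) * W := by
        rw [Nat.succ_mul]; omega
      have : k.1.toNat * W + k.2.toNat < H * W :=
        lt_of_lt_of_le this (Nat.mul_le_mul_right W hk1)
      simpa using this
    calc _ ≤ (Finset.range (H * W)).card := Finset.card_le_card hsub
      _ = H * W := by simp

def pvTri (v : Int) (p : Int × Int) : Int × Int × Int := (p.1, p.2, v)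

def pvRel (H W : Nat) (vis : List (List Bool)) (dist : PySem.Dict (Int × Int) Int) : Prop :=
  pvShape vis H W ∧ ∀ p : Int × Int, pvInB H W p → pvGet2 vis p.1 p.2 = dist.contains p

def pvAccum (H W : Nat) (dist₀ dist : PySem.Dict (Int × Int) Int)
    (acc : List (Int × Int)) (v : Int) : Prop :=
  dist.keys = dist₀.keys ++ acc ∧
  (∀ p ∈ acc, dist.get? p = some v) ∧
  (∀ p : Int × Int, p ∉ acc → dist.get? p = dist₀.get? p) ∧
  (∀ p ∈ acc, pvInB H W p ∧ dist₀.contains p = false) ∧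
  acc.Nodup

def pvAStep (grid : List (List String)) (H W : Nat) (vis : List (List Bool)) (nr nc : Int) :
    List (List Bool) :=
  if pvCondA grid H W vis nr nc then pvSet2 vis nr nc true else vis

lemma pvContains_of_get? {d : PySem.Dict (Int × Int) Int} {k : Int × Int} {v : Int}
    (h : d.get? k = some v) : d.contains k = true := by
  rw [PySem.Dict.contains_iff_mem_keys]
  by_contra hm
  rw [(PySem.Dict.get?_eq_none_iff_not_mem_keys d _).mpr hm] at h
  cases h

lemma pvST (grid : List (List String)) (H W : Nat) (dist₀ dist : PySem.Dict (Int × Int) Int)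
    (vis : List (List Bool)) (acc : List (Int × Int)) (Q : List (Int × Int × Int)) (v : Int)
    (nr nc : Int) (hR : pvRel H W vis dist) (hA : pvAccum H W dist₀ dist acc v) :
    ((if pvCondA grid H W vis nr nc then
        (pvSet2 vis nr nc true, (Q ++ acc.map (pvTri v)) ++ [(nr, nc, v)])
      else (vis, Q ++ acc.map (pvTri v)))
      = (pvAStep grid H W vis nr nc,
         Q ++ ((pvStepB (pvPassable grid H W) v (dist, acc) (nr, nc)).2).map (pvTri v)))
    ∧ pvRel H W (pvAStep grid H W vis nr nc)
        (pvStepB (pvPassable grid H W) v (dist, acc) (nr, nc)).1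
    ∧ pvAccum H W dist₀ (pvStepB (pvPassable grid H W) v (dist, acc) (nr, nc)).1
        (pvStepB (pvPassable grid H W) v (dist, acc) (nr, nc)).2 v := by
  obtain ⟨hshape, hRel⟩ := hR
  obtain ⟨hk, hacc, hout, hfacts, hnd⟩ := hA
  have hcond := pvCondA_eq grid H W vis dist nr nc hRel
  by_cases hc : pvCondA grid H W vis nr nc = true
  · have hcB : (PySem.Set.contains (pvPassable grid H W) (nr, nc) && !(dist.contains (nr, nc))) = true := by
      rw [← hcond]; exact hc
    have hP : PySem.Set.contains (pvPassable grid H W) (nr, nc) = true :=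
      (Bool.and_eq_true _ _ |>.mp hcB).1
    have hnc : dist.contains (nr, nc) = false :=
      Bool.not_eq_true' .. |>.mp (Bool.and_eq_true _ _ |>.mp hcB).2
    obtain ⟨hInB, hSB⟩ := (pvMem_passable grid H W (nr, nc)).mp hP
    have hfresh : (nr, nc) ∉ acc := by
      intro hm
      have h1 := pvContains_of_get? (hacc _ hm)
      rw [h1] at hnc; cases hnc
    have hfresh0 : dist₀.contains (nr, nc) = false := by
      by_contra hm
      have h1 : (nr, nc) ∈ dist₀.keys := by
        rw [← PySem.Dict.contains_iff_mem_keys]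
        cases h' : dist₀.contains (nr, nc)
        · exact absurd h' hm
        · rfl
      have h2 : (nr, nc) ∈ dist.keys := by rw [hk]; exact List.mem_append_left _ h1
      rw [← PySem.Dict.contains_iff_mem_keys] at h2
      rw [h2] at hnc; cases hnc
    have hB : pvStepB (pvPassable grid H W) v (dist, acc) (nr, nc)
        = (dist.insert (nr, nc) v, acc ++ [(nr, nc)]) := by
      unfold pvStepB
      rw [hP, hnc]
      rfl
    rw [hB]
    have hA' : pvAStep grid H W vis nr nc = pvSet2 vis nr nc true := by
      simp only [pvAStep, hc, if_true]
    rw [hA']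
    refine ⟨?_, ⟨pvShape_upd hshape hInB, ?_⟩, ?_, ?_, ?_, ?_, ?_⟩
    · simp only [hc, if_true, List.map_append, List.map_cons, List.map_nil, pvTri,
        List.append_assoc]
    · intro p hp
      have : pvGet2 (pvSet2 vis nr nc true) p.1 p.2
          = pvIdx (pvUpd vis nr nc true) p.1 p.2 false := rfl
      rw [this, pvIdx_upd hshape hInB (by exact hp)]
      rw [PySem.Dict.contains_insert]
      by_cases hpe : p = (nr, nc)
      · subst hpe; simp
      · have : ¬ (p.1 = nr ∧ p.2 = nc) := by
          intro hx; exact hpe (Prod.ext hx.1 hx.2)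
        have hbe : (p == (nr, nc)) = false := by
          simp only [beq_eq_false_iff_ne, ne_eq]; exact hpe
        simp only [this, if_false, hbe, Bool.false_or]
        exact hRel p hp
    · rw [PySem.Dict.keys_insert_of_not_contains _ _ hnc, hk, List.append_assoc]
    · intro p hp
      rcases List.mem_append.mp hp with hp | hp
      · rw [PySem.Dict.get?_insert]
        have : p ≠ (nr, nc) := by rintro rfl; exact hfresh hp
        rw [if_neg this]; exact hacc _ hp
      · simp only [List.mem_singleton] at hp; subst hp
        rw [PySem.Dict.get?_insert, if_pos rfl]
    · intro p hp
      have h1 : p ∉ acc := fun h => hp (List.mem_append_left _ h)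
      have h2 : p ≠ (nr, nc) := by rintro rfl; exact hp (List.mem_append_right _ (by simp))
      rw [PySem.Dict.get?_insert, if_neg h2]; exact hout p h1
    · intro p hp
      rcases List.mem_append.mp hp with hp | hp
      · exact hfacts _ hp
      · simp only [List.mem_singleton] at hp; subst hp
        exact ⟨hInB, hfresh0⟩
    · rw [List.nodup_append]
      refine ⟨hnd, List.nodup_singleton _, ?_⟩
      intro a ha b hb
      rw [List.mem_singleton] at hb
      subst hb
      rintro rfl
      exact hfresh ha
  · have hcB : (PySem.Set.contains (pvPassable grid H W) (nr, nc) && !(dist.contains (nr, nc))) = false := by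
      rw [← hcond]; exact Bool.eq_false_iff.mpr hc
    have hB : pvStepB (pvPassable grid H W) v (dist, acc) (nr, nc) = (dist, acc) := by
      simp only [pvStepB, hcB, Bool.false_eq_true, if_false]
    rw [hB]
    have hcf : pvCondA grid H W vis nr nc = false := Bool.eq_false_iff.mpr hc
    have hA' : pvAStep grid H W vis nr nc = vis := by
      simp only [pvAStep, hcf, Bool.false_eq_true, if_false]
    rw [hA']
    exact ⟨by simp only [hcf, Bool.false_eq_true, if_false], ⟨hshape, hRel⟩,
      ⟨hk, hacc, hout, hfacts, hnd⟩⟩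

def pvANode (grid : List (List String)) (H W : Nat) (vis : List (List Bool)) (p : Int × Int) :
    List (List Bool) :=
  (pvCands p).foldl (fun w cand => pvAStep grid H W w cand.1 cand.2) vis

lemma pvFoldST (grid : List (List String)) (H W : Nat) (dist₀ : PySem.Dict (Int × Int) Int)
    (v : Int) :
    ∀ (L : List (Int × Int)) (vis : List (List Bool)) (dist : PySem.Dict (Int × Int) Int)
      (acc : List (Int × Int)) (Q : List (Int × Int × Int)),
    pvRel H W vis dist → pvAccum H W dist₀ dist acc v →
    ((L.foldl (fun (st : List (List Bool) × List (Int × Int × Int)) cand =>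
        if pvCondA grid H W st.1 cand.1 cand.2 then
          (pvSet2 st.1 cand.1 cand.2 true, st.2 ++ [(cand.1, cand.2, v)])
        else st) (vis, Q ++ acc.map (pvTri v)))
      = (L.foldl (fun w cand => pvAStep grid H W w cand.1 cand.2) vis,
         Q ++ ((L.foldl (pvStepB (pvPassable grid H W) v) (dist, acc)).2).map (pvTri v)))
    ∧ pvRel H W (L.foldl (fun w cand => pvAStep grid H W w cand.1 cand.2) vis)
        (L.foldl (pvStepB (pvPassable grid H W) v) (dist, acc)).1
    ∧ pvAccum H W dist₀ (L.foldl (pvStepB (pvPassable grid H W) v) (dist, acc)).1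
        (L.foldl (pvStepB (pvPassable grid H W) v) (dist, acc)).2 v := by
  intro L
  induction L with
  | nil => intro vis dist acc Q hR hA; exact ⟨rfl, hR, hA⟩
  | cons cand L ih =>
    intro vis dist acc Q hR hA
    obtain ⟨c1, c2⟩ := cand
    obtain ⟨hst, hR', hA'⟩ := pvST grid H W dist₀ dist vis acc Q v c1 c2 hR hA
    simp only [List.foldl_cons]
    have hsplit : pvStepB (pvPassable grid H W) v (dist, acc) (c1, c2)
        = ((pvStepB (pvPassable grid H W) v (dist, acc) (c1, c2)).1,
           (pvStepB (pvPassable grid H W) v (dist, acc) (c1, c2)).2) := rfl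
    rw [hst]
    rw [hsplit] at hR' hA' ⊢
    exact ih (pvAStep grid H W vis c1 c2)
      (pvStepB (pvPassable grid H W) v (dist, acc) (c1, c2)).1
      (pvStepB (pvPassable grid H W) v (dist, acc) (c1, c2)).2 Q hR' hA'

lemma pvDeltas {β : Type} (body : β → Int → Int → β) (r c : Int) (st0 : β) :
    [((0 : Int), (1 : Int)), (1, 0), (0, -1), (-1, 0)].foldl
        (fun st δ => body st (r + δ.1) (c + δ.2)) st0
      = (pvCands (r, c)).foldl (fun st q => body st q.1 q.2) st0 := by
  simp only [pvCands, List.foldl]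
  norm_num [Int.sub_eq_add_neg]

def pvWAll (g : List (List Int)) (F : List (Int × Int)) (d : Int) : List (List Int) :=
  F.foldl (fun g p => pvSetI2 g p.1 p.2 d) g

lemma pvLoopA_nil (grid : List (List String)) (H W : Nat) (fA : Nat)
    (vis : List (List Bool)) (g : List (List Int)) :
    pvLoopA grid H W fA [] vis g = g := by
  cases fA <;> rfl

lemma pvLL (grid : List (List String)) (H W : Nat) (dist₀ : PySem.Dict (Int × Int) Int)
    (d : Int) :
    ∀ (F : List (Int × Int)) (f : Nat) (acc : List (Int × Int)) (vis : List (List Bool))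
      (g : List (List Int)) (dist : PySem.Dict (Int × Int) Int),
    pvRel H W vis dist → pvAccum H W dist₀ dist acc (d + 1) →
    (pvLoopA grid H W (F.length + f) (F.map (pvTri d) ++ acc.map (pvTri (d + 1))) vis g
      = pvLoopA grid H W f
          (((F.foldl (pvNodeB (pvPassable grid H W) (d + 1)) (dist, acc)).2).map (pvTri (d + 1)))
          (F.foldl (pvANode grid H W) vis) (pvWAll g F d))
    ∧ pvRel H W (F.foldl (pvANode grid H W) vis)
        (F.foldl (pvNodeB (pvPassable grid H W) (d + 1)) (dist, acc)).1
    ∧ pvAccum H W dist₀ (F.foldl (pvNodeB (pvPassable grid H W) (d + 1)) (dist, acc)).1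
        (F.foldl (pvNodeB (pvPassable grid H W) (d + 1)) (dist, acc)).2 (d + 1) := by
  intro F
  induction F with
  | nil =>
    intro f acc vis g dist hR hA
    simp only [List.length_nil, Nat.zero_add, List.foldl_nil, List.map_nil, List.nil_append]
    exact ⟨rfl, hR, hA⟩
  | cons p F ih =>
    intro f acc vis g dist hR hA
    have hlen : (p :: F).length + f = (F.length + f) + 1 := by
      simp only [List.length_cons]; omega
    rw [hlen]
    have hq : (p :: F).map (pvTri d) ++ acc.map (pvTri (d + 1))
        = (p.1, p.2, d) :: (F.map (pvTri d) ++ acc.map (pvTri (d + 1))) := by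
      simp [pvTri]
    rw [hq]
    simp only [pvLoopA]
    rw [pvDeltas (fun st nr nc =>
      if pvCondA grid H W st.1 nr nc then (pvSet2 st.1 nr nc true, st.2 ++ [(nr, nc, d + 1)])
      else st) p.1 p.2]
    obtain ⟨hst, hR', hA'⟩ := pvFoldST grid H W dist₀ (d + 1) (pvCands (p.1, p.2)) vis dist acc
      (F.map (pvTri d)) hR hA
    rw [hst]
    have hcands : pvCands (p.1, p.2) = pvCands p := by simp [pvCands]
    have hnode : ∀ st, (pvCands p).foldl (pvStepB (pvPassable grid H W) (d + 1)) st
        = pvNodeB (pvPassable grid H W) (d + 1) st p := by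
      intro st; rfl
    rw [hcands] at hst hR' hA' ⊢
    rw [hnode] at hR' hA' ⊢
    have := ih f (pvNodeB (pvPassable grid H W) (d + 1) (dist, acc) p).2
      ((pvCands p).foldl (fun w cand => pvAStep grid H W w cand.1 cand.2) vis)
      (pvSetI2 g p.1 p.2 d)
      (pvNodeB (pvPassable grid H W) (d + 1) (dist, acc) p).1 hR' ?_
    · obtain ⟨heq, hR'', hA''⟩ := this
      refine ⟨?_, ?_, ?_⟩
      · rw [heq]
        simp only [List.foldl_cons, pvWAll, pvANode]
      · simpa only [List.foldl_cons, pvANode] using hR''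
      · simpa only [List.foldl_cons] using hA''
    · simpa using hA'

lemma pvWAll_spec (H W : Nat) (d : Int) :
    ∀ (F : List (Int × Int)) (g : List (List Int)), pvShape g H W → (∀ p ∈ F, pvInB H W p) →
    pvShape (pvWAll g F d) H W ∧
      ∀ r c : Int, pvInB H W (r, c) →
        pvIdx (pvWAll g F d) r c (-1) = if (r, c) ∈ F then d else pvIdx g r c (-1) := by
  intro F
  induction F with
  | nil =>
    intro g hs _
    exact ⟨hs, fun r c _ => by simp [pvWAll]⟩
  | cons p F ih =>
    intro g hs hF
    have hp : pvInB H W p := hF p (by simp)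
    have hp' : pvInB H W (p.1, p.2) := hp
    have hstep : pvWAll g (p :: F) d = pvWAll (pvUpd g p.1 p.2 d) F d := by
      simp [pvWAll]; rfl
    have hs' : pvShape (pvUpd g p.1 p.2 d) H W := pvShape_upd hs hp'
    obtain ⟨hsh, hidx⟩ := ih (pvUpd g p.1 p.2 d) hs' (fun q hq => hF q (by simp [hq]))
    rw [hstep]
    refine ⟨hsh, ?_⟩
    intro r c hrc
    rw [hidx r c hrc, pvIdx_upd hs hp' hrc]
    by_cases h1 : (r, c) ∈ F
    · rw [if_pos h1, if_pos (by rw [List.mem_cons]; exact Or.inr h1)]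
    · by_cases h2 : r = p.1 ∧ c = p.2
      · have hep : (r, c) = p := Prod.ext h2.1 h2.2
        rw [if_neg h1, if_pos h2, if_pos (by rw [List.mem_cons]; exact Or.inl hep)]
      · have hne : (r, c) ≠ p := by
          intro hx; exact h2 ⟨by rw [← hx], by rw [← hx]⟩
        rw [if_neg h1, if_neg h2, if_neg (by rw [List.mem_cons]; rintro (h | h); exacts [hne h, h1 h])]

lemma pvLoopB_nil (passable : PySem.Set (Int × Int)) (fB : Nat)
    (dist : PySem.Dict (Int × Int) Int) (d : Int) :
    pvLoopB passable fB [] dist d = dist := by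
  cases fB <;> simp [pvLoopB]

lemma pvLoopB_cons (passable : PySem.Set (Int × Int)) (fB : Nat) (p : Int × Int)
    (F : List (Int × Int)) (dist : PySem.Dict (Int × Int) Int) (d : Int) :
    pvLoopB passable (fB + 1) (p :: F) dist d
      = pvLoopB passable fB ((p :: F).foldl (pvNodeB passable (d + 1)) (dist, [])).2
          ((p :: F).foldl (pvNodeB passable (d + 1)) (dist, [])).1 (d + 1) := by
  simp [pvLoopB]

lemma pvML (grid : List (List String)) (H W : Nat) :
    ∀ (fB : Nat) (F : List (Int × Int)) (dist : PySem.Dict (Int × Int) Int)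
      (vis : List (List Bool)) (g : List (List Int)) (d : Int) (fA : Nat),
    pvRel H W vis dist →
    dist.keys.Nodup →
    (∀ k ∈ dist.keys, pvInB H W k) →
    (∀ p ∈ F, dist.get? p = some d) →
    (∀ (i j : Nat), i < H → j < W →
      pvIdx g (i : Int) (j : Int) (-1)
        = if ((i : Int), (j : Int)) ∈ F then -1 else dist.getD ((i : Int), (j : Int)) (-1)) →
    pvShape g H W →
    H * W + 1 ≤ fB + dist.keys.length →
    H * W + F.length + 1 ≤ fA + dist.keys.length →
    pvLoopA grid H W fA (F.map (pvTri d)) vis g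
      = (List.range H).map fun (i : Nat) => (List.range W).map fun (j : Nat) =>
          (pvLoopB (pvPassable grid H W) fB F dist d).getD ((i : Int), (j : Int)) (-1) := by
  intro fB
  induction fB with
  | zero =>
    intro F dist vis g d fA hR hnd hkInB hF hgrid hs hfB hfA
    exfalso
    have := pvCNT hnd hkInB
    omega
  | succ fB ih =>
    intro F dist vis g d fA hR hnd hkInB hF hgrid hs hfB hfA
    have hklen := pvCNT hnd hkInB
    cases F with
    | nil =>
      rw [List.map_nil, pvLoopA_nil, pvLoopB_nil]
      apply pvTab_ext (-1) _ hs
      intro i j hi hj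
      simpa using hgrid i j hi hj
    | cons p F' =>
      have hLInB : ∀ q ∈ p :: F', pvInB H W q := by
        intro q hq
        have h1 := pvContains_of_get? (hF q hq)
        rw [PySem.Dict.contains_iff_mem_keys] at h1
        exact hkInB q h1
      have hAcc0 : pvAccum H W dist dist [] (d + 1) :=
        ⟨by simp, by simp, fun q _ => rfl, by simp, List.nodup_nil⟩
      have hfAsplit : fA = (p :: F').length + (fA - (p :: F').length) := by
        simp only [List.length_cons] at hfA ⊢
        omega
      obtain ⟨heq, hR', hA'⟩ := pvLL grid H W dist d (p :: F') (fA - (p :: F').length) [] vis g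
        dist hR hAcc0
      rw [List.map_nil, List.append_nil] at heq
      rw [hfAsplit, heq]
      rw [pvLoopB_cons]
      set res := (p :: F').foldl (pvNodeB (pvPassable grid H W) (d + 1)) (dist, []) with hres
      obtain ⟨hk', hacc', hout', hfacts', hnd'⟩ := hA'
      have hfreshNotKeys : ∀ q ∈ res.2, q ∉ dist.keys := by
        intro q hq hmem
        have := (hfacts' q hq).2
        rw [← PySem.Dict.contains_iff_mem_keys] at hmem
        rw [hmem] at this; cases this
      have hnd'' : res.1.keys.Nodup := by
        rw [hk', List.nodup_append]
        refine ⟨hnd, hnd', ?_⟩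
        intro a ha b hb
        rintro rfl
        exact hfreshNotKeys a hb ha
      have hkInB' : ∀ k ∈ res.1.keys, pvInB H W k := by
        intro k hk
        rw [hk', List.mem_append] at hk
        rcases hk with hk | hk
        · exact hkInB k hk
        · exact (hfacts' k hk).1
      obtain ⟨hsW, hidxW⟩ := pvWAll_spec H W d (p :: F') g hs hLInB
      have hgrid' : ∀ (i j : Nat), i < H → j < W →
          pvIdx (pvWAll g (p :: F') d) (i : Int) (j : Int) (-1)
            = if ((i : Int), (j : Int)) ∈ res.2 then -1
              else res.1.getD ((i : Int), (j : Int)) (-1) := by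
        intro i j hi hj
        have hInB : pvInB H W ((i : Int), (j : Int)) := by
          refine ⟨by simp, by simpa using hi, by simp, by simpa using hj⟩
        rw [hidxW _ _ hInB]
        set q : Int × Int := ((i : Int), (j : Int)) with hqdef
        by_cases hqL : q ∈ p :: F'
        · rw [if_pos hqL]
          have hqK : q ∈ dist.keys := by
            have := pvContains_of_get? (hF q hqL)
            rwa [PySem.Dict.contains_iff_mem_keys] at this
          have hqnr : q ∉ res.2 := fun hx => hfreshNotKeys q hx hqK
          rw [if_neg hqnr, PySem.Dict.getD_eq_get?_getD, hout' q hqnr, hF q hqL]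
          rfl
        · rw [if_neg hqL]
          have := hgrid i j hi hj
          rw [← hqdef] at this
          rw [this, if_neg hqL]
          by_cases hqr : q ∈ res.2
          · rw [if_pos hqr]
            exact PySem.Dict.getD_of_not_contains dist _ (hfacts' q hqr).2
          · rw [if_neg hqr, PySem.Dict.getD_eq_get?_getD, PySem.Dict.getD_eq_get?_getD,
              hout' q hqr]
      have hlen' : res.1.keys.length = dist.keys.length + res.2.length := by
        rw [hk', List.length_append]
      cases hresF : res.2 with
      | nil =>
        rw [List.map_nil, pvLoopA_nil, pvLoopB_nil]
        apply pvTab_ext (-1) _ hsW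
        intro i j hi hj
        have := hgrid' i j hi hj
        rw [hresF] at this
        simpa using this
      | cons q Q' =>
        rw [← hresF]
        apply ih res.2 res.1 _ _ (d + 1) _ hR' hnd'' hkInB' hacc' hgrid' hsW
        · rw [hlen', hresF]
          simp only [List.length_cons] at hfB ⊢
          omega
        · rw [hlen']
          simp only [List.length_cons] at hfA ⊢
          omega

lemma pvDict0_keys (k : Int × Int) : (PySem.Dict.ofList [(k, (0 : Int))]).keys = [k] := by
  simp [PySem.Dict.ofList, PySem.Dict.update, PySem.Dict.keys_insert_of_not_contains,
    PySem.Dict.contains_empty, PySem.Dict.keys_empty]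

lemma pvDict0_get? (k p : Int × Int) :
    (PySem.Dict.ofList [(k, (0 : Int))]).get? p = if p = k then some 0 else none := by
  by_cases h : p = k
  · subst h; simp [PySem.Dict.ofList, PySem.Dict.update]
  · simp [PySem.Dict.ofList, PySem.Dict.update, PySem.Dict.get?_insert, h, PySem.Dict.get?_empty]

lemma pvDict0_contains (k p : Int × Int) :
    (PySem.Dict.ofList [(k, (0 : Int))]).contains p = decide (p = k) := by
  by_cases h : p = k
  · subst h
    simp [PySem.Dict.contains_iff_mem_keys, pvDict0_keys]
  · have : (PySem.Dict.ofList [(k, (0 : Int))]).contains p = false := by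
      rw [← Bool.not_eq_true, PySem.Dict.contains_iff_mem_keys, pvDict0_keys]
      simp [h]
    rw [this, decide_eq_false h]

lemma pvInner (grid : List (List String)) (H W : Nat) (or oc : Nat)
    (hor : or < H) (hoc : oc < W) :
    pvLoopA grid H W (H * W + 1) [((or : Int), (oc : Int), 0)]
        (pvSet2 ((List.range H).map fun _ => (List.range W).map fun _ => false)
          (or : Int) (oc : Int) true)
        ((List.range H).map fun _ => (List.range W).map fun _ => (-1 : Int))
      = (List.range H).map fun (i : Nat) => (List.range W).map fun (j : Nat) =>
          (pvLoopB (pvPassable grid H W) (H * W + 1) [((or : Int), (oc : Int))]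
            (PySem.Dict.ofList [((((or : Int), (oc : Int))), (0 : Int))]) 0).getD
            ((i : Int), (j : Int)) (-1) := by
  have hInBk : pvInB H W ((or : Int), (oc : Int)) :=
    ⟨by simp, by simp; exact_mod_cast hor, by simp, by simp; exact_mod_cast hoc⟩
  have hq : [((or : Int), (oc : Int), (0 : Int))]
      = [((or : Int), (oc : Int))].map (pvTri 0) := rfl
  rw [hq]
  apply pvML grid H W (H * W + 1) [((or : Int), (oc : Int))]
    (PySem.Dict.ofList [((((or : Int), (oc : Int))), (0 : Int))]) _ _ 0 (H * W + 1)
  · constructor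
    · exact pvShape_upd (pvShape_tab H W fun _ _ => false) hInBk
    · intro p hp
      have hbr : pvGet2 (pvSet2 ((List.range H).map fun _ => (List.range W).map fun _ => false)
          (or : Int) (oc : Int) true) p.1 p.2
          = pvIdx (pvUpd ((List.range H).map fun _ => (List.range W).map fun _ => false)
            (or : Int) (oc : Int) true) p.1 p.2 false := rfl
      rw [hbr, pvIdx_upd (pvShape_tab H W fun _ _ => false) hInBk hp,
        pvDict0_contains ((or : Int), (oc : Int)) p]
      by_cases h : p = ((or : Int), (oc : Int))
      · rw [if_pos ⟨by rw [h], by rw [h]⟩, decide_eq_true h]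
      · have h2 : ¬ (p.1 = (or : Int) ∧ p.2 = (oc : Int)) := by
          intro hx; exact h (Prod.ext hx.1 hx.2)
        rw [if_neg h2, decide_eq_false h, pvIdx_tab _ hp]
  · rw [pvDict0_keys]; exact List.nodup_singleton _
  · intro q hq'
    rw [pvDict0_keys] at hq'
    rw [List.mem_singleton] at hq'
    subst hq'; exact hInBk
  · intro p hp
    rw [List.mem_singleton] at hp
    subst hp
    rw [pvDict0_get?, if_pos rfl]
  · intro i j hi hj
    have hInB : pvInB H W ((i : Int), (j : Int)) :=
      ⟨by simp, by simp; exact_mod_cast hi, by simp, by simp; exact_mod_cast hj⟩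
    rw [pvIdx_tab _ hInB]
    by_cases h : ((i : Int), (j : Int)) = ((or : Int), (oc : Int))
    · rw [if_pos (by rw [List.mem_singleton]; exact h)]
    · rw [if_neg (by rw [List.mem_singleton]; exact h), PySem.Dict.getD_eq_get?_getD,
        pvDict0_get?, if_neg h]
      rfl
  · exact pvShape_tab H W fun _ _ => (-1 : Int)
  · rw [pvDict0_keys]; simp
  · rw [pvDict0_keys]; simp

-- ===== new material: the bisimulation between the level loop and the relaxation loop =====

def pvMatI (H W : Nat) (INF : Int) (dict : PySem.Dict (Int × Int) Int) : List (List Int) :=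
  (List.range H).map fun (i : Nat) => (List.range W).map fun (j : Nat) =>
    dict.getD ((i : Int), (j : Int)) INF

def pvMatD (H W : Nat) (dict : PySem.Dict (Int × Int) Int) : List (List Int) :=
  (List.range H).map fun (i : Nat) => (List.range W).map fun (j : Nat) =>
    dict.getD ((i : Int), (j : Int)) (-1)

lemma pvTab_congr {α : Type} (H W : Nat) (F G : Nat → Nat → α)
    (h : ∀ i j, i < H → j < W → F i j = G i j) :
    ((List.range H).map fun i => (List.range W).map fun j => F i j)
      = ((List.range H).map fun i => (List.range W).map fun j => G i j) := by
  apply List.map_congr_left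
  intro i hi
  apply List.map_congr_left
  intro j hj
  exact h i j (List.mem_range.mp hi) (List.mem_range.mp hj)

lemma pvFoldMin_le_init : ∀ (l : List Int) (a : Int), l.foldl min a ≤ a := by
  intro l
  induction l with
  | nil => intro a; simp
  | cons x l ih =>
    intro a
    calc (x :: l).foldl min a = l.foldl min (min a x) := rfl
      _ ≤ min a x := ih _
      _ ≤ a := min_le_left _ _

lemma pvFoldMin_le_mem : ∀ (l : List Int) (a x : Int), x ∈ l → l.foldl min a ≤ x := by
  intro l
  induction l with
  | nil => intro a x hx; cases hx
  | cons y l ih =>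
    intro a x hx
    rcases List.mem_cons.mp hx with h | h
    · subst h
      calc (x :: l).foldl min a = l.foldl min (min a x) := rfl
        _ ≤ min a x := pvFoldMin_le_init _ _
        _ ≤ x := min_le_right _ _
    · exact ih (min a y) x h

lemma pvLe_foldMin : ∀ (l : List Int) (a c : Int), c ≤ a → (∀ x ∈ l, c ≤ x) →
    c ≤ l.foldl min a := by
  intro l
  induction l with
  | nil => intro a c h _; simpa using h
  | cons x l ih =>
    intro a c h hl
    exact ih (min a x) c (le_min h (hl x (by simp))) (fun y hy => hl y (by simp [hy]))

lemma pvCands_symm (p q : Int × Int) : q ∈ pvCands p ↔ p ∈ pvCands q := by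
  simp only [pvCands, List.mem_cons, List.mem_singleton, List.not_mem_nil, or_false,
    Prod.ext_iff]
  omega

lemma pvCastBack {H W : Nat} {p : Int × Int} (h : pvInB H W p) :
    ((p.1.toNat : Int), (p.2.toNat : Int)) = p := by
  obtain ⟨a1, a2, a3, a4⟩ := h
  cases p
  simp only at a1 a3 ⊢
  rw [Int.toNat_of_nonneg a1, Int.toNat_of_nonneg a3]

lemma pvGetI2_matI {H W : Nat} {INF : Int} {dict : PySem.Dict (Int × Int) Int} {r c : Int}
    (h : pvInB H W (r, c)) :
    pvGetI2 (pvMatI H W INF dict) r c = dict.getD (r, c) INF := by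
  have h1 : pvGetI2 (pvMatI H W INF dict) r c
      = pvIdx ((List.range H).map fun (i : Nat) => (List.range W).map fun (j : Nat) =>
          dict.getD ((i : Int), (j : Int)) INF) r c 0 := rfl
  rw [h1, pvIdx_tab _ h]
  have := pvCastBack (H := H) (W := W) (p := (r, c)) h
  simp only at this
  rw [show ((r.toNat : Int), (c.toNat : Int)) = (r, c) from this]

lemma pvGet_of_contains {dict : PySem.Dict (Int × Int) Int} {k : Int × Int}
    (h : dict.contains k = true) : ∃ v, dict.get? k = some v := by
  rw [PySem.Dict.contains_iff_mem_keys] at h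
  cases hg : dict.get? k with
  | none =>
    rw [PySem.Dict.get?_eq_none_iff_not_mem_keys] at hg
    exact absurd h hg
  | some v => exact ⟨v, rfl⟩

lemma pvPassB_eq (grid : List (List String)) (H W : Nat) (i j : Nat)
    (hi : i < H) (hj : j < W) :
    pvPassB grid H W (i : Int) (j : Int)
      = PySem.Set.contains (pvPassable grid H W) ((i : Int), (j : Int)) := by
  have hInB : pvInB H W ((i : Int), (j : Int)) :=
    ⟨by simp, by simp; exact_mod_cast hi, by simp, by simp; exact_mod_cast hj⟩
  have h1 : ((i : Int) < (H : Int)) := by exact_mod_cast hi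
  have h2 : ((j : Int) < (W : Int)) := by exact_mod_cast hj
  by_cases hSB : pvIsSB (pvCell grid (i : Int) (j : Int)) = true
  · have hP : PySem.Set.contains (pvPassable grid H W) ((i : Int), (j : Int)) = true := by
      rw [pvMem_passable]; exact ⟨hInB, hSB⟩
    rw [hP]
    simp [pvPassB, hSB, h1, h2]
  · have hP : PySem.Set.contains (pvPassable grid H W) ((i : Int), (j : Int)) = false := by
      rw [← Bool.not_eq_true, pvMem_passable]; tauto
    rw [hP]
    simp [pvPassB, hSB]

lemma pvFilt (H W : Nat) (p : Int × Int) :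
    ((decide (0 ≤ p.1) && decide (p.1 < (H : Int)) && decide (0 ≤ p.2) &&
        decide (p.2 < (W : Int))) = true) ↔ pvInB H W p := by
  simp [pvInB, and_assoc]

-- monotonicity / coverage / provenance of the frontier fold
lemma pvFoldStep_mono (pass : PySem.Set (Int × Int)) (v : Int) (q : Int × Int) :
    ∀ (L : List (Int × Int)) (st : PySem.Dict (Int × Int) Int × List (Int × Int)),
    st.1.contains q = true → ((L.foldl (pvStepB pass v) st).1).contains q = true := by
  intro L
  induction L with
  | nil => intro st h; exact h
  | cons c L ih =>
    intro st h
    simp only [List.foldl_cons]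
    apply ih
    unfold pvStepB
    split
    · simp only [PySem.Dict.contains_insert, h, Bool.or_true]
    · exact h

lemma pvFoldStep_covers (pass : PySem.Set (Int × Int)) (v : Int) (q : Int × Int)
    (hpass : PySem.Set.contains pass q = true) :
    ∀ (L : List (Int × Int)) (st : PySem.Dict (Int × Int) Int × List (Int × Int)),
    q ∈ L → ((L.foldl (pvStepB pass v) st).1).contains q = true := by
  intro L
  induction L with
  | nil => intro st h; cases h
  | cons c L ih =>
    intro st h
    simp only [List.foldl_cons]
    rcases List.mem_cons.mp h with h | h
    · subst h
      apply pvFoldStep_mono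
      unfold pvStepB
      by_cases hc : st.1.contains q = true
      · split
        · simp only [PySem.Dict.contains_insert, hc, Bool.or_true]
        · exact hc
      · have hb : st.1.contains q = false := by
          cases hx : st.1.contains q
          · rfl
          · exact absurd hx hc
        have : (PySem.Set.contains pass q && !(st.1.contains q)) = true := by
          rw [hpass, hb]; rfl
        rw [if_pos this]
        simp [PySem.Dict.contains_insert]
    · exact ih _ h

lemma pvFoldNode_mono (pass : PySem.Set (Int × Int)) (v : Int) (q : Int × Int) :
    ∀ (F : List (Int × Int)) (st : PySem.Dict (Int × Int) Int × List (Int × Int)),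
    st.1.contains q = true → ((F.foldl (pvNodeB pass v) st).1).contains q = true := by
  intro F
  induction F with
  | nil => intro st h; exact h
  | cons p F ih =>
    intro st h
    simp only [List.foldl_cons, pvNodeB]
    exact ih _ (pvFoldStep_mono pass v q (pvCands p) st h)

lemma pvFoldNode_covers (pass : PySem.Set (Int × Int)) (v : Int) (q : Int × Int)
    (hpass : PySem.Set.contains pass q = true) :
    ∀ (F : List (Int × Int)) (st : PySem.Dict (Int × Int) Int × List (Int × Int)) (p : Int × Int),
    p ∈ F → q ∈ pvCands p → ((F.foldl (pvNodeB pass v) st).1).contains q = true := by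
  intro F
  induction F with
  | nil => intro st p h; cases h
  | cons p0 F ih =>
    intro st p h hq
    simp only [List.foldl_cons]
    rcases List.mem_cons.mp h with h | h
    · subst h
      exact pvFoldNode_mono pass v q F _
        (pvFoldStep_covers pass v q hpass (pvCands p) st hq)
    · exact ih _ p h hq

lemma pvFoldStep_prov (pass : PySem.Set (Int × Int)) (v : Int) (q : Int × Int) :
    ∀ (L : List (Int × Int)) (st : PySem.Dict (Int × Int) Int × List (Int × Int)),
    q ∈ (L.foldl (pvStepB pass v) st).2 →
    q ∈ st.2 ∨ (PySem.Set.contains pass q = true ∧ q ∈ L) := by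
  intro L
  induction L with
  | nil => intro st h; exact Or.inl h
  | cons c L ih =>
    intro st h
    simp only [List.foldl_cons] at h
    rcases ih _ h with h' | h'
    · unfold pvStepB at h'
      by_cases hcond : (PySem.Set.contains pass c && !(st.1.contains c)) = true
      · rw [if_pos hcond] at h'
        simp only at h'
        rcases List.mem_append.mp h' with h'' | h''
        · exact Or.inl h''
        · rw [List.mem_singleton] at h''
          subst h''
          exact Or.inr ⟨(Bool.and_eq_true _ _ |>.mp hcond).1, by simp⟩
      · rw [if_neg hcond] at h'
        exact Or.inl h'
    · exact Or.inr ⟨h'.1, by simp [h'.2]⟩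

lemma pvFoldNode_prov (pass : PySem.Set (Int × Int)) (v : Int) (q : Int × Int) :
    ∀ (F : List (Int × Int)) (st : PySem.Dict (Int × Int) Int × List (Int × Int)),
    q ∈ (F.foldl (pvNodeB pass v) st).2 →
    q ∈ st.2 ∨ (PySem.Set.contains pass q = true ∧ ∃ p ∈ F, q ∈ pvCands p) := by
  intro F
  induction F with
  | nil => intro st h; exact Or.inl h
  | cons p F ih =>
    intro st h
    simp only [List.foldl_cons] at h
    rcases ih _ h with h' | h'
    · rcases pvFoldStep_prov pass v q (pvCands p) st h' with h'' | h''
      · exact Or.inl h''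
      · exact Or.inr ⟨h''.1, p, by simp, h''.2⟩
    · exact Or.inr ⟨h'.1, by obtain ⟨p', hp', hq'⟩ := h'.2; exact ⟨p', by simp [hp'], hq'⟩⟩

-- canonical visited matrix, to reuse pvLL for accumulator facts about the frontier fold
lemma pvRel_canon (H W : Nat) (dict : PySem.Dict (Int × Int) Int) :
    pvRel H W ((List.range H).map fun (i : Nat) => (List.range W).map fun (j : Nat) =>
      dict.contains ((i : Int), (j : Int))) dict := by
  refine ⟨pvShape_tab H W _, ?_⟩
  intro p hp
  have h1 : pvGet2 ((List.range H).map fun (i : Nat) => (List.range W).map fun (j : Nat) =>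
      dict.contains ((i : Int), (j : Int))) p.1 p.2
      = pvIdx ((List.range H).map fun (i : Nat) => (List.range W).map fun (j : Nat) =>
          dict.contains ((i : Int), (j : Int))) p.1 p.2 false := rfl
  rw [h1, pvIdx_tab _ hp]
  rw [show ((p.1.toNat : Int), (p.2.toNat : Int)) = p from pvCastBack hp]

lemma pvFoldNode_accum (grid : List (List String)) (H W : Nat) (d : Int)
    (dict : PySem.Dict (Int × Int) Int) (F : List (Int × Int)) :
    pvAccum H W dict (F.foldl (pvNodeB (pvPassable grid H W) (d + 1)) (dict, [])).1
      (F.foldl (pvNodeB (pvPassable grid H W) (d + 1)) (dict, [])).2 (d + 1) := by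
  have hAcc0 : pvAccum H W dict dict [] (d + 1) :=
    ⟨by simp, by simp, fun q _ => rfl, by simp, List.nodup_nil⟩
  exact (pvLL grid H W dict d F 0 [] _ [] dict (pvRel_canon H W dict) hAcc0).2.2

-- the invariant tying a level-BFS state to its distance dictionary
def pvInv (grid : List (List String)) (H W : Nat) (d : Int)
    (dict : PySem.Dict (Int × Int) Int) (F : List (Int × Int)) : Prop :=
  0 ≤ d ∧
  dict.keys.Nodup ∧
  d.toNat + 1 ≤ dict.keys.length ∧
  (∀ q v, dict.get? q = some v →
    0 ≤ v ∧ v ≤ d ∧ pvInB H W q ∧ pvIsSB (pvCell grid q.1 q.2) = true) ∧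
  (∀ q, q ∈ F ↔ dict.get? q = some d) ∧
  (∀ p v q, dict.get? p = some v → v < d → q ∈ pvCands p → pvInB H W q →
    pvIsSB (pvCell grid q.1 q.2) = true → ∃ w, dict.get? q = some w ∧ w ≤ v + 1)

lemma pvKeysInB (grid : List (List String)) (H W : Nat) (d : Int)
    (dict : PySem.Dict (Int × Int) Int) (F : List (Int × Int))
    (hInv : pvInv grid H W d dict F) : ∀ k ∈ dict.keys, pvInB H W k := by
  intro k hk
  obtain ⟨v, hv⟩ := pvGet_of_contains (by rwa [PySem.Dict.contains_iff_mem_keys])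
  exact (hInv.2.2.2.1 k v hv).2.2.1

lemma pvDle (grid : List (List String)) (H W : Nat) (d : Int)
    (dict : PySem.Dict (Int × Int) Int) (F : List (Int × Int))
    (hInv : pvInv grid H W d dict F) : d + 1 ≤ ((H * W : Nat) : Int) := by
  have h1 := pvCNT hInv.2.1 (pvKeysInB grid H W d dict F hInv)
  have h2 := hInv.2.2.1
  have h0 := hInv.1
  omega

-- the core step: one relaxation round mirrors one frontier round
lemma pvRelax_eq (grid : List (List String)) (H W : Nat) (d : Int)
    (dict : PySem.Dict (Int × Int) Int) (F : List (Int × Int))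
    (hInv : pvInv grid H W d dict F) :
    pvRelax grid H W (((H * W : Nat) : Int) + 1) (pvMatI H W (((H * W : Nat) : Int) + 1) dict)
      = pvMatI H W (((H * W : Nat) : Int) + 1)
          (F.foldl (pvNodeB (pvPassable grid H W) (d + 1)) (dict, [])).1 := by
  obtain ⟨hk, hacc, hout, hfacts, hnd2⟩ := pvFoldNode_accum grid H W d dict F
  have hdle := pvDle grid H W d dict F hInv
  obtain ⟨hd0, hnd, hlen, hvals, hfront, hJ⟩ := hInv
  set res := F.foldl (pvNodeB (pvPassable grid H W) (d + 1)) (dict, []) with hresdef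
  have hpassNew : ∀ q ∈ res.2, PySem.Set.contains (pvPassable grid H W) q = true := by
    intro q hq
    rcases pvFoldNode_prov (pvPassable grid H W) (d + 1) q F (dict, []) hq with h | h
    · cases h
    · exact h.1
  unfold pvRelax
  conv_rhs => unfold pvMatI
  apply pvTab_congr
  intro i j hi hj
  have hInBq : pvInB H W ((i : Int), (j : Int)) :=
    ⟨by simp, by simp; exact_mod_cast hi, by simp, by simp; exact_mod_cast hj⟩
  rw [pvPassB_eq grid H W i j hi hj]
  have hmemE : ∀ x : Int,
      x ∈ ((pvCands ((i : Int), (j : Int))).filter fun p =>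
          decide (0 ≤ p.1) && decide (p.1 < (H : Int)) && decide (0 ≤ p.2) &&
            decide (p.2 < (W : Int))).map
        (fun p => pvGetI2 (pvMatI H W (((H * W : Nat) : Int) + 1) dict) p.1 p.2 + 1) →
      ∃ p, p ∈ pvCands ((i : Int), (j : Int)) ∧ pvInB H W p ∧
        x = dict.getD p (((H * W : Nat) : Int) + 1) + 1 := by
    intro x hx
    simp only [List.mem_map, List.mem_filter] at hx
    obtain ⟨p, ⟨hp1, hp2⟩, rfl⟩ := hx
    have hin : pvInB H W p := (pvFilt H W p).mp hp2
    refine ⟨p, hp1, hin, ?_⟩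
    rw [show pvGetI2 (pvMatI H W (((H * W : Nat) : Int) + 1) dict) p.1 p.2
        = dict.getD (p.1, p.2) (((H * W : Nat) : Int) + 1) from pvGetI2_matI hin,
      show (p.1, p.2) = p from rfl]
  have hmemI : ∀ p : Int × Int, p ∈ pvCands ((i : Int), (j : Int)) → pvInB H W p →
      (dict.getD p (((H * W : Nat) : Int) + 1) + 1)
        ∈ ((pvCands ((i : Int), (j : Int))).filter fun p =>
            decide (0 ≤ p.1) && decide (p.1 < (H : Int)) && decide (0 ≤ p.2) &&
              decide (p.2 < (W : Int))).map
          (fun p => pvGetI2 (pvMatI H W (((H * W : Nat) : Int) + 1) dict) p.1 p.2 + 1) := by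
    intro p hp hin
    simp only [List.mem_map, List.mem_filter]
    refine ⟨p, ⟨hp, (pvFilt H W p).mpr hin⟩, ?_⟩
    rw [show pvGetI2 (pvMatI H W (((H * W : Nat) : Int) + 1) dict) p.1 p.2
        = dict.getD (p.1, p.2) (((H * W : Nat) : Int) + 1) from pvGetI2_matI hin,
      show (p.1, p.2) = p from rfl]
  have hinit : pvGetI2 (pvMatI H W (((H * W : Nat) : Int) + 1) dict) (i : Int) (j : Int)
      = dict.getD ((i : Int), (j : Int)) (((H * W : Nat) : Int) + 1) := pvGetI2_matI hInBq
  by_cases hP : PySem.Set.contains (pvPassable grid H W) ((i : Int), (j : Int)) = true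
  · rw [if_pos hP]
    obtain ⟨_, hSBq⟩ := (pvMem_passable grid H W _).mp hP
    cases hq : dict.get? ((i : Int), (j : Int)) with
    | some v =>
      obtain ⟨hv0, hvd, _, _⟩ := hvals _ v hq
      have hqnr : ((i : Int), (j : Int)) ∉ res.2 := by
        intro hx
        have h1 := (hfacts _ hx).2
        rw [pvContains_of_get? hq] at h1
        cases h1
      have hRHS : res.1.getD ((i : Int), (j : Int)) (((H * W : Nat) : Int) + 1) = v := by
        rw [PySem.Dict.getD_eq_get?_getD, hout _ hqnr, hq]; rfl
      have hinitv : dict.getD ((i : Int), (j : Int)) (((H * W : Nat) : Int) + 1) = v := by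
        rw [PySem.Dict.getD_eq_get?_getD, hq]; rfl
      rw [hRHS, hinit, hinitv]
      apply le_antisymm
      · exact pvFoldMin_le_init _ _
      · refine pvLe_foldMin _ _ _ le_rfl fun x hx => ?_
        obtain ⟨p, hpc, hpin, rfl⟩ := hmemE x hx
        cases hp : dict.get? p with
        | none =>
          rw [PySem.Dict.getD_eq_get?_getD, hp]
          simp only [Option.getD_none]
          omega
        | some vp =>
          rw [PySem.Dict.getD_eq_get?_getD, hp]
          simp only [Option.getD_some]
          obtain ⟨hvp0, hvpd, _, _⟩ := hvals p vp hp
          by_cases hvd2 : vp < d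
          · obtain ⟨w, hw, hwle⟩ := hJ p vp ((i : Int), (j : Int)) hp hvd2
              ((pvCands_symm _ p).mp hpc) hInBq hSBq
            rw [hq] at hw
            have hvw : v = w := Option.some.inj hw
            omega
          · omega
    | none =>
      by_cases hqr : ((i : Int), (j : Int)) ∈ res.2
      · have hRHS : res.1.getD ((i : Int), (j : Int)) (((H * W : Nat) : Int) + 1) = d + 1 := by
          rw [PySem.Dict.getD_eq_get?_getD, hacc _ hqr]; rfl
        rw [hRHS]
        rcases pvFoldNode_prov (pvPassable grid H W) (d + 1) _ F (dict, []) hqr with hc | hc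
        · cases hc
        obtain ⟨_, p, hpF, hqc⟩ := hc
        have hpd : dict.get? p = some d := (hfront p).mp hpF
        have hpInB : pvInB H W p := (hvals p d hpd).2.2.1
        have hpcq : p ∈ pvCands ((i : Int), (j : Int)) := (pvCands_symm p _).mp hqc
        have hpv : dict.getD p (((H * W : Nat) : Int) + 1) = d := by
          rw [PySem.Dict.getD_eq_get?_getD, hpd]; rfl
        have hinitN : pvGetI2 (pvMatI H W (((H * W : Nat) : Int) + 1) dict) (i : Int) (j : Int)
            = ((H * W : Nat) : Int) + 1 := by
          rw [hinit, PySem.Dict.getD_eq_get?_getD, hq]; rfl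
        rw [hinitN]
        apply le_antisymm
        · have h1 := pvFoldMin_le_mem _ (((H * W : Nat) : Int) + 1) _ (hmemI p hpcq hpInB)
          rw [hpv] at h1
          exact h1
        · refine pvLe_foldMin _ _ _ (by omega) fun x hx => ?_
          obtain ⟨r, hrc, hrin, rfl⟩ := hmemE x hx
          cases hr : dict.get? r with
          | none =>
            rw [PySem.Dict.getD_eq_get?_getD, hr]
            simp only [Option.getD_none]
            omega
          | some vr =>
            rw [PySem.Dict.getD_eq_get?_getD, hr]
            simp only [Option.getD_some]
            obtain ⟨_, hvrd, _, _⟩ := hvals r vr hr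
            by_cases hvd2 : vr < d
            · obtain ⟨w, hw, _⟩ := hJ r vr ((i : Int), (j : Int)) hr hvd2
                ((pvCands_symm _ r).mp hrc) hInBq hSBq
              rw [hq] at hw
              cases hw
            · omega
      · have hRHS : res.1.getD ((i : Int), (j : Int)) (((H * W : Nat) : Int) + 1)
            = ((H * W : Nat) : Int) + 1 := by
          rw [PySem.Dict.getD_eq_get?_getD, hout _ hqr, hq]; rfl
        have hinitN : pvGetI2 (pvMatI H W (((H * W : Nat) : Int) + 1) dict) (i : Int) (j : Int)
            = ((H * W : Nat) : Int) + 1 := by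
          rw [hinit, PySem.Dict.getD_eq_get?_getD, hq]; rfl
        rw [hRHS, hinitN]
        apply le_antisymm
        · exact pvFoldMin_le_init _ _
        · refine pvLe_foldMin _ _ _ le_rfl fun x hx => ?_
          obtain ⟨r, hrc, hrin, rfl⟩ := hmemE x hx
          cases hr : dict.get? r with
          | none =>
            rw [PySem.Dict.getD_eq_get?_getD, hr]
            simp only [Option.getD_none]
            omega
          | some vr =>
            obtain ⟨_, hvrd, _, _⟩ := hvals r vr hr
            by_cases hvd2 : vr < d
            · obtain ⟨w, hw, _⟩ := hJ r vr ((i : Int), (j : Int)) hr hvd2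
                ((pvCands_symm _ r).mp hrc) hInBq hSBq
              rw [hq] at hw
              cases hw
            · have hvr : vr = d := by omega
              rw [hvr] at hr
              have hrF : r ∈ F := (hfront r).mpr hr
              have hqcr : ((i : Int), (j : Int)) ∈ pvCands r := (pvCands_symm _ r).mp hrc
              have hcont := pvFoldNode_covers (pvPassable grid H W) (d + 1) _ hP F (dict, [])
                r hrF hqcr
              obtain ⟨w, hw⟩ := pvGet_of_contains hcont
              rw [hout _ hqr, hq] at hw
              cases hw
  · rw [if_neg hP]
    by_cases hqr : ((i : Int), (j : Int)) ∈ res.2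
    · exact absurd (hpassNew _ hqr) hP
    · rw [PySem.Dict.getD_eq_get?_getD, hout _ hqr]
      cases hq : dict.get? ((i : Int), (j : Int)) with
      | none => rfl
      | some v =>
        obtain ⟨_, _, hin, hSB⟩ := hvals _ v hq
        exact absurd ((pvMem_passable grid H W _).mpr ⟨hin, hSB⟩) hP

-- the invariant is preserved by a round
lemma pvInv_step (grid : List (List String)) (H W : Nat) (d : Int)
    (dict : PySem.Dict (Int × Int) Int) (F : List (Int × Int))
    (hInv : pvInv grid H W d dict F) :
    (F.foldl (pvNodeB (pvPassable grid H W) (d + 1)) (dict, [])).2 ≠ [] →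
    pvInv grid H W (d + 1) (F.foldl (pvNodeB (pvPassable grid H W) (d + 1)) (dict, [])).1
        (F.foldl (pvNodeB (pvPassable grid H W) (d + 1)) (dict, [])).2
    ∧ dict.keys.length + 1
        ≤ (F.foldl (pvNodeB (pvPassable grid H W) (d + 1)) (dict, [])).1.keys.length := by
  intro hne
  obtain ⟨hk, hacc, hout, hfacts, hnd2⟩ := pvFoldNode_accum grid H W d dict F
  obtain ⟨hd0, hnd, hlen, hvals, hfront, hJ⟩ := hInv
  set res := F.foldl (pvNodeB (pvPassable grid H W) (d + 1)) (dict, []) with hres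
  -- newly harvested cells are passable
  have hpassNew : ∀ q ∈ res.2,
      PySem.Set.contains (pvPassable grid H W) q = true := by
    intro q hq
    rcases pvFoldNode_prov (pvPassable grid H W) (d + 1) q F (dict, []) hq with h | h
    · cases h
    · exact h.1
  -- values of the new dictionary
  have hvals' : ∀ q v, res.1.get? q = some v →
      0 ≤ v ∧ v ≤ d + 1 ∧ pvInB H W q ∧ pvIsSB (pvCell grid q.1 q.2) = true := by
    intro q v hqv
    by_cases hqacc : q ∈ res.2
    · have hv1 : v = d + 1 := by
        have := (hacc q hqacc).symm.trans hqv
        exact (Option.some.inj this).symm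
      subst hv1
      have hSB := ((pvMem_passable grid H W q).mp (hpassNew q hqacc)).2
      exact ⟨by omega, le_refl _, (hfacts q hqacc).1, hSB⟩
    · rw [hout q hqacc] at hqv
      obtain ⟨a, b, c, e⟩ := hvals q v hqv
      exact ⟨a, by omega, c, e⟩
  have hgrow : res.1.keys.length = dict.keys.length + res.2.length := by
    rw [hk, List.length_append]
  have hlen2 : 1 ≤ res.2.length := by
    cases hx : res.2 with
    | nil => exact absurd hx hne
    | cons a t => simp
  refine ⟨⟨by omega, ?_, ?_, hvals', ?_, ?_⟩, by omega⟩
  · -- nodup keys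
    rw [hk, List.nodup_append]
    refine ⟨hnd, hnd2, ?_⟩
    intro a ha b hb
    rintro rfl
    have := (hfacts a hb).2
    rw [← PySem.Dict.contains_iff_mem_keys] at ha
    rw [ha] at this
    cases this
  · omega
  · -- frontier characterization
    intro q
    constructor
    · intro hq; exact hacc q hq
    · intro hq
      by_contra hq2
      rw [hout q hq2] at hq
      have := (hvals q (d + 1) hq).2.1
      omega
  · -- the adjacency invariant
    intro p v q hpv hvlt hcands hinBq hSBq
    have hpassq : PySem.Set.contains (pvPassable grid H W) q = true :=
      (pvMem_passable grid H W q).mpr ⟨hinBq, hSBq⟩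
    by_cases hpacc : p ∈ res.2
    · have : v = d + 1 := by
        have := (hacc p hpacc).symm.trans hpv
        exact (Option.some.inj this).symm
      omega
    · have hpd : dict.get? p = some v := by rw [← hout p hpacc]; exact hpv
      by_cases hvd : v < d
      · obtain ⟨w, hw, hwle⟩ := hJ p v q hpd hvd hcands hinBq hSBq
        have hqnacc : q ∉ res.2 := by
          intro hx
          have h1 := (hfacts q hx).2
          rw [pvContains_of_get? hw] at h1
          cases h1
        exact ⟨w, by rw [hout q hqnacc]; exact hw, hwle⟩
      · have hveq : v = d := by
          have := (hvals p v hpd).2.1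
          omega
        rw [hveq] at hpd
        have hpF : p ∈ F := (hfront p).mpr hpd
        have hcont : res.1.contains q = true :=
          pvFoldNode_covers (pvPassable grid H W) (d + 1) q hpassq F (dict, []) p hpF hcands
        obtain ⟨w, hw⟩ := pvGet_of_contains hcont
        exact ⟨w, hw, by have := (hvals' q w hw).2.1; omega⟩

-- an empty harvest leaves the dictionary unchanged
lemma pvRound_id (grid : List (List String)) (H W : Nat) (d : Int)
    (dict : PySem.Dict (Int × Int) Int) (F : List (Int × Int))
    (h : (F.foldl (pvNodeB (pvPassable grid H W) (d + 1)) (dict, [])).2 = []) :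
    ∀ q, (F.foldl (pvNodeB (pvPassable grid H W) (d + 1)) (dict, [])).1.get? q
      = dict.get? q := by
  intro q
  have hA := pvFoldNode_accum grid H W d dict F
  exact hA.2.2.1 q (by rw [h]; exact List.not_mem_nil)

-- a nonempty harvest changes the matrix
lemma pvRound_ne (grid : List (List String)) (H W : Nat) (d : Int)
    (dict : PySem.Dict (Int × Int) Int) (F : List (Int × Int))
    (hInv : pvInv grid H W d dict F)
    (h : (F.foldl (pvNodeB (pvPassable grid H W) (d + 1)) (dict, [])).2 ≠ []) :
    pvMatI H W (((H * W : Nat) : Int) + 1)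
        (F.foldl (pvNodeB (pvPassable grid H W) (d + 1)) (dict, [])).1
      ≠ pvMatI H W (((H * W : Nat) : Int) + 1) dict := by
  intro hEq
  obtain ⟨hk, hacc, hout, hfacts, hnd2⟩ := pvFoldNode_accum grid H W d dict F
  cases hres2 : (F.foldl (pvNodeB (pvPassable grid H W) (d + 1)) (dict, [])).2 with
  | nil => exact h hres2
  | cons q t =>
    have hq : q ∈ (F.foldl (pvNodeB (pvPassable grid H W) (d + 1)) (dict, [])).2 := by
      rw [hres2]; simp
    have hInBq : pvInB H W q := (hfacts q hq).1
    have hInBq' : pvInB H W (q.1, q.2) := hInBq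
    have := congrArg (fun g => pvGetI2 g q.1 q.2) hEq
    simp only at this
    rw [pvGetI2_matI hInBq', pvGetI2_matI hInBq'] at this
    have h1 : (F.foldl (pvNodeB (pvPassable grid H W) (d + 1)) (dict, [])).1.getD (q.1, q.2)
        (((H * W : Nat) : Int) + 1) = d + 1 := by
      rw [PySem.Dict.getD_eq_get?_getD, show (q.1, q.2) = q from rfl, hacc q hq]; rfl
    have h2 : dict.getD (q.1, q.2) (((H * W : Nat) : Int) + 1) = ((H * W : Nat) : Int) + 1 := by
      rw [show (q.1, q.2) = q from rfl]
      exact PySem.Dict.getD_of_not_contains dict _ (hfacts q hq).2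
    rw [h1, h2] at this
    have := pvDle grid H W d dict F hInv
    omega

-- replacing the INF sentinel with -1 gives the getD (-1) matrix
lemma pvMatD_eq (H W : Nat) (dict : PySem.Dict (Int × Int) Int)
    (hv : ∀ q v, dict.get? q = some v → v < ((H * W : Nat) : Int) + 1) :
    pvMatD H W dict
      = (pvMatI H W (((H * W : Nat) : Int) + 1) dict).map
          fun row => row.map fun x => if x < ((H * W : Nat) : Int) + 1 then x else -1 := by
  unfold pvMatD pvMatI
  rw [List.map_map]
  apply List.map_congr_left
  intro i _
  simp only [Function.comp_apply]
  rw [List.map_map]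
  apply List.map_congr_left
  intro j _
  simp only [Function.comp_apply]
  cases hq : dict.get? ((i : Int), (j : Int)) with
  | none =>
    rw [PySem.Dict.getD_eq_get?_getD, PySem.Dict.getD_eq_get?_getD, hq]
    simp
  | some v =>
    rw [PySem.Dict.getD_eq_get?_getD, PySem.Dict.getD_eq_get?_getD, hq]
    simp only [Option.getD_some]
    rw [if_pos (hv _ v hq)]

-- the bisimulation
lemma pvBisimL (grid : List (List String)) (H W : Nat) :
    ∀ (f : Nat) (F : List (Int × Int)) (dict : PySem.Dict (Int × Int) Int) (d : Int),
    pvInv grid H W d dict F →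
    H * W + 1 ≤ f + dict.keys.length →
    pvMatD H W (pvLoopB (pvPassable grid H W) (f + 1) F dict d)
      = (pvBellLoop grid H W (((H * W : Nat) : Int) + 1) f
          (pvMatI H W (((H * W : Nat) : Int) + 1) dict)).map
          fun row => row.map fun x => if x < ((H * W : Nat) : Int) + 1 then x else -1 := by
  intro f
  induction f with
  | zero =>
    intro F dict d hInv hfuel
    exfalso
    have h1 := pvCNT hInv.2.1 (pvKeysInB grid H W d dict F hInv)
    omega
  | succ f ih =>
    intro F dict d hInv hfuel
    have hvINF : ∀ q v, dict.get? q = some v → v < ((H * W : Nat) : Int) + 1 := by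
      intro q v hq
      have h1 := (hInv.2.2.2.1 q v hq).2.1
      have h2 := pvDle grid H W d dict F hInv
      omega
    cases F with
    | nil =>
      rw [pvLoopB_nil]
      have hrel := pvRelax_eq grid H W d dict [] hInv
      simp only [List.foldl_nil] at hrel
      simp only [pvBellLoop]
      rw [hrel, if_pos rfl]
      exact pvMatD_eq H W dict hvINF
    | cons p F' =>
      have hrel := pvRelax_eq grid H W d dict (p :: F') hInv
      rw [pvLoopB_cons]
      simp only [pvBellLoop]
      by_cases hres : ((p :: F').foldl (pvNodeB (pvPassable grid H W) (d + 1)) (dict, [])).2 = []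
      · have hid0 := pvRound_id grid H W d dict (p :: F') hres
        have hidI : pvMatI H W (((H * W : Nat) : Int) + 1)
            ((p :: F').foldl (pvNodeB (pvPassable grid H W) (d + 1)) (dict, [])).1
            = pvMatI H W (((H * W : Nat) : Int) + 1) dict := by
          unfold pvMatI
          apply pvTab_congr
          intro i j hi hj
          rw [PySem.Dict.getD_eq_get?_getD, PySem.Dict.getD_eq_get?_getD, hid0]
        have hidD : pvMatD H W
            ((p :: F').foldl (pvNodeB (pvPassable grid H W) (d + 1)) (dict, [])).1
            = pvMatD H W dict := by
          unfold pvMatD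
          apply pvTab_congr
          intro i j hi hj
          rw [PySem.Dict.getD_eq_get?_getD, PySem.Dict.getD_eq_get?_getD, hid0]
        rw [hres, pvLoopB_nil, hidD, hrel, hidI, if_pos rfl]
        exact pvMatD_eq H W dict hvINF
      · rw [hrel, if_neg (pvRound_ne grid H W d dict (p :: F') hInv hres)]
        obtain ⟨hInv', hgrow⟩ := pvInv_step grid H W d dict (p :: F') hInv hres
        exact ih _ _ _ hInv' (by omega)

-- the initial grid of B is the matrix of the singleton dictionary
lemma pvInit_eq (H W : Nat) (sr sc : Nat) (hsr : sr < H) (hsc : sc < W) :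
    pvSetI2 ((List.range H).map fun _ => (List.range W).map fun _ => (((H * W : Nat) : Int) + 1))
        (sr : Int) (sc : Int) 0
      = pvMatI H W (((H * W : Nat) : Int) + 1)
          (PySem.Dict.ofList [((((sr : Int), (sc : Int))), (0 : Int))]) := by
  have hInBs : pvInB H W ((sr : Int), (sc : Int)) :=
    ⟨by simp, by simp; exact_mod_cast hsr, by simp, by simp; exact_mod_cast hsc⟩
  unfold pvMatI
  have hbr : pvSetI2 ((List.range H).map fun _ => (List.range W).map fun _ =>
        (((H * W : Nat) : Int) + 1)) (sr : Int) (sc : Int) 0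
      = pvUpd ((List.range H).map fun _ => (List.range W).map fun _ =>
        (((H * W : Nat) : Int) + 1)) (sr : Int) (sc : Int) 0 := rfl
  rw [hbr]
  apply pvTab_ext 0 _ (pvShape_upd (pvShape_tab H W fun _ _ => (((H * W : Nat) : Int) + 1)) hInBs)
  intro i j hi hj
  have hInB : pvInB H W ((i : Int), (j : Int)) :=
    ⟨by simp, by simp; exact_mod_cast hi, by simp, by simp; exact_mod_cast hj⟩
  rw [pvIdx_upd (pvShape_tab H W fun _ _ => (((H * W : Nat) : Int) + 1)) hInBs hInB]
  by_cases h : ((i : Int) = (sr : Int) ∧ (j : Int) = (sc : Int))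
  · rw [if_pos h, PySem.Dict.getD_eq_get?_getD, pvDict0_get?, if_pos (Prod.ext h.1 h.2)]
    rfl
  · rw [if_neg h, pvIdx_tab _ hInB, PySem.Dict.getD_eq_get?_getD, pvDict0_get?,
      if_neg (by intro hx; rw [Prod.mk.injEq] at hx; exact h hx)]
    rfl

theorem pv_main (grid : List (List String)) :
    bfs_between_every_two_slots grid = bfs_between_every_two_slots_alt grid := by
  unfold bfs_between_every_two_slots bfs_between_every_two_slots_alt
  apply List.map_congr_left
  intro sr hsr
  rw [List.mem_range] at hsr
  apply List.map_congr_left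
  intro sc hsc
  rw [List.mem_range] at hsc
  have hInB : pvInB grid.length (grid.getD 0 []).length ((sr : Int), (sc : Int)) :=
    ⟨by simp, by simpa using hsr, by simp, by simpa using hsc⟩
  by_cases hSB : pvIsSB (pvCell grid (sr : Int) (sc : Int)) = true
  · have hP : PySem.Set.contains (pvPassable grid grid.length (grid.getD 0 []).length)
        ((sr : Int), (sc : Int)) = true := (pvMem_passable _ _ _ _).mpr ⟨hInB, hSB⟩
    have hPB : pvPassB grid grid.length (grid.getD 0 []).length (sr : Int) (sc : Int) = true := by
      rw [pvPassB_eq grid _ _ sr sc hsr hsc]; exact hP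
    rw [if_pos hSB, if_pos hPB]
    rw [pvInner grid grid.length (grid.getD 0 []).length sr sc hsr hsc]
    have hInv0 : pvInv grid grid.length (grid.getD 0 []).length 0
        (PySem.Dict.ofList [((((sr : Int), (sc : Int))), (0 : Int))])
        [((sr : Int), (sc : Int))] := by
      refine ⟨le_refl 0, ?_, ?_, ?_, ?_, ?_⟩
      · rw [pvDict0_keys]; exact List.nodup_singleton _
      · rw [pvDict0_keys]; simp
      · intro q v hq
        rw [pvDict0_get?] at hq
        by_cases h : q = ((sr : Int), (sc : Int))
        · rw [if_pos h] at hq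
          have hv := Option.some.inj hq
          subst h
          exact ⟨by omega, by omega, hInB, hSB⟩
        · rw [if_neg h] at hq; cases hq
      · intro q
        rw [pvDict0_get?]
        constructor
        · intro hqm
          rw [List.mem_singleton] at hqm
          rw [if_pos hqm]
        · intro hq
          by_cases h : q = ((sr : Int), (sc : Int))
          · rw [List.mem_singleton]; exact h
          · rw [if_neg h] at hq; cases hq
      · intro p v q hp hvlt _ _ _
        rw [pvDict0_get?] at hp
        by_cases h : p = ((sr : Int), (sc : Int))
        · rw [if_pos h] at hp
          have := Option.some.inj hp
          omega
        · rw [if_neg h] at hp; cases hp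
    have hb := pvBisimL grid grid.length (grid.getD 0 []).length
      (grid.length * (grid.getD 0 []).length) [((sr : Int), (sc : Int))]
      (PySem.Dict.ofList [((((sr : Int), (sc : Int))), (0 : Int))]) 0 hInv0
      (by rw [pvDict0_keys]; simp)
    rw [pvInit_eq grid.length (grid.getD 0 []).length sr sc hsr hsc]
    exact hb
  · have hPB : pvPassB grid grid.length (grid.getD 0 []).length (sr : Int) (sc : Int) = false := by
      have hc : PySem.Set.contains (pvPassable grid grid.length (grid.getD 0 []).length)
          ((sr : Int), (sc : Int)) = false := by
        rw [← Bool.not_eq_true, pvMem_passable]; tauto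
      rw [pvPassB_eq grid _ _ sr sc hsr hsc]; exact hc
    rw [if_neg hSB, if_neg (by rw [hPB]; exact Bool.false_ne_true)]
    apply List.map_congr_left
    intro i _
    simp [List.map_const']

-- ===== VERDICT (by name: the statement is the Claim_ definition above) =====
theorem bfs_between_every_two_slots_spec : Claim_equal_bfs_between_every_two_slots := by
  intro grid _ _
  unfold Spec_bfs_between_every_two_slots
  exact pv_main grid
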